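-- pv_equiv track=rewrite | github.com/StahlFerro/asciify | asciify.py | format_ascii_img
-- ===== SOURCE A (Python) =====
-- from typing import Union, List, Generator
--
-- def format_ascii_img(char_array: Union[List, Generator], width: int):
--     """Format list or generator of ascii chars with newlines based on the image's width
--
--     Args:
--         char_array (Union[List, Generator]): List or generator of characters
--         width (int): Image width
--     """
--     text_list = []
--     px_num: int = 1
--     for c in char_array:
--         if px_num % width == 0:
--             text_list.append(f"{c}\n")
--         else:
--             text_list.append(c)
--         px_num += 1
--     return "".join(text_list)
-- ===== SOURCE B (Python) =====
-- def format_ascii_img(char_array, width):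
--     """Rows of `width` characters, each completed row terminated by a newline."""
--     chars = list(char_array)
--     full, rem = divmod(len(chars), width)
--     parts = ["".join(chars[i * width:(i + 1) * width]) + "\n" for i in range(full)]
--     if rem:
--         parts.append("".join(chars[full * width:]))
--     return "".join(parts)
-- ===== Notes on version B (the rewrite author's own statement) =====
-- stated objective: simpler
-- what changed: Replaces the per-character counter+modulo loop by a chunk-wise pass: divmod gives the number of full rows and the remainder, each full row is a slice joined with a trailing newline, the remainder is appended as the last line; Pre_ restricts to positive widths (the natural domain of an image width) plus the trivial empty input with nonzero width -- for width <= 0 A's chunk-every-|width| output (and its '' on ([],0)) is an artefact of Python's modulo, while B's divmod-based chunking naturally yields '' (or raises ZeroDivisionError on width 0).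
-- outside the precondition, e.g. on format_ascii_img(['a', 'b', 'c', 'd'], -2): A returns 'ab\ncd\n', B returns ''; on format_ascii_img([], 0): A returns '', B raises ZeroDivisionError
import Mathlib
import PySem

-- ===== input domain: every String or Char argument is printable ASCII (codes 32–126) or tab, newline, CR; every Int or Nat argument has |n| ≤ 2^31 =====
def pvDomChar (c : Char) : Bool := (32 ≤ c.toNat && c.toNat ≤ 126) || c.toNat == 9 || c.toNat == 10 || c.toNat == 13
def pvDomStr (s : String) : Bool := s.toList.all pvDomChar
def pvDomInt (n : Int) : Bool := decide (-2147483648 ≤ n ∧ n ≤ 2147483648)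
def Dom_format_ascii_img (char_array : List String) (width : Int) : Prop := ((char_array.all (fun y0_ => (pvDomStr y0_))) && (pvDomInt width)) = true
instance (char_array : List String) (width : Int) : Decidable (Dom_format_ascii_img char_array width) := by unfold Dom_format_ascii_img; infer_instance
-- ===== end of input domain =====

-- B replaces A's per-character counter+modulo loop by a chunk-wise pass (divmod into full
-- rows + remainder, each full row a slice terminated by '\n'); objective: simpler.

-- ===== PORT A =====
-- literal port of A: counter px_num starting at 1, append "c\n" when px_num % width == 0, "".join
def format_ascii_img (char_array : List String) (width : Int) : String :=
  PySem.Str.join ""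
    (char_array.foldl
      (fun (acc : List String × Int) c =>
        (acc.1 ++ [if PySem.Int.mod acc.2 width = 0 then c ++ "\n" else c], acc.2 + 1))
      ([], 1)).1

-- ===== PORT B =====
-- literal port of Source B: divmod, full rows from range/slice each with "\n", remainder row if rem
def format_ascii_img_alt (char_array : List String) (width : Int) : String :=
  match PySem.Int.divmod? (char_array.length : Int) width with
  | none => ""   -- ZeroDivisionError in Python; excluded by Pre_
  | some (full, rem) =>
    let parts := (PySem.List.pyRange 0 full 1).map
      (fun i => PySem.Str.join ""
        (PySem.List.slice char_array (some (i * width)) (some ((i + 1) * width))) ++ "\n")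
    let parts := if rem ≠ 0 then
        parts ++ [PySem.Str.join "" (PySem.List.slice char_array (some (full * width)) none)]
      else parts
    PySem.Str.join "" parts

-- ===== PRECONDITION & SPEC =====
-- Pre_ restricts to positive widths — the natural domain of an image width — plus the trivial
-- empty input with nonzero width; for width ≤ 0 A's chunk-every-|width| output (and its "" on
-- ([], 0)) is an artefact of Python's modulo, which B does not reproduce (B yields "" for a
-- negative width and raises ZeroDivisionError for width 0).
def Pre_format_ascii_img (char_array : List String) (width : Int) : Prop :=
  0 < width ∨ (char_array = [] ∧ width ≠ 0)
instance (char_array : List String) (width : Int) : Decidable (Pre_format_ascii_img char_array width) := by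
  unfold Pre_format_ascii_img; infer_instance
def pvWitness_format_ascii_img : List String × Int := (["a", "b", "c"], 2)

def Spec_format_ascii_img (char_array : List String) (width : Int) (out : String) : Prop := out = format_ascii_img_alt char_array width
instance (char_array : List String) (width : Int) (out : String) : Decidable (Spec_format_ascii_img char_array width out) := by unfold Spec_format_ascii_img; infer_instance

-- ===== CLAIM (what is proved, stated in full; the proofs are below) =====
def Claim_equal_format_ascii_img : Prop := ∀ (char_array : List String) (width : Int), Dom_format_ascii_img char_array width → Pre_format_ascii_img char_array width → Spec_format_ascii_img char_array width (format_ascii_img char_array width)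

-- ===== LEMMAS AND PROOFS =====

-- A's loop body, as a function of the remaining input and the counter
def aBody (width : Int) : List String → Int → List String
  | [], _ => []
  | c :: cs, m => (if PySem.Int.mod m width = 0 then c ++ "\n" else c) :: aBody width cs (m + 1)

-- same list, tracked by "chars left until the next newline" (w = width, j counts down from w)
def bodyN (w : Nat) : List String → Nat → List String
  | [], _ => []
  | c :: cs, j => if j ≤ 1 then (c ++ "\n") :: bodyN w cs w else c :: bodyN w cs (j - 1)

theorem foldA (width : Int) (xs : List String) :
    ∀ (acc : List String) (m : Int),
      (xs.foldl
        (fun (acc : List String × Int) c =>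
          (acc.1 ++ [if PySem.Int.mod acc.2 width = 0 then c ++ "\n" else c], acc.2 + 1))
        (acc, m)).1 = acc ++ aBody width xs m := by
  induction xs with
  | nil => intro acc m; simp [aBody]
  | cons c cs ih => intro acc m; simp [aBody, List.foldl_cons, ih]

theorem join_empty_sep (l : List (List Char)) : PySem.Chars.join [] l = l.flatten := by
  induction l with
  | nil => simp [PySem.Chars.join_nil]
  | cons p rest ih =>
    cases rest with
    | nil => simp [PySem.Chars.join_singleton]
    | cons q r => rw [PySem.Chars.join_cons_cons]; simp_all

theorem aBody_eq_bodyN (width : Int) (hw : width ≠ 0) (w : Nat) (hww : w = width.natAbs) :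
    ∀ (xs : List String) (m : Int) (j : Nat), 1 ≤ j → j ≤ w → (w : Int) ∣ (m + j - 1) →
      aBody width xs m = bodyN w xs j := by
  intro xs
  induction xs with
  | nil => intro m j _ _ _; simp [aBody, bodyN]
  | cons c cs ih =>
    intro m j h1 h2 hdvd
    have hw1 : 1 ≤ w := by
      have := Int.natAbs_pos.mpr hw; omega
    have hmod : (PySem.Int.mod m width = 0) ↔ ((w : Int) ∣ m) := by
      rw [PySem.Int.mod_eq_zero_iff_dvd, hww, Int.natAbs_dvd]
    by_cases hj : j ≤ 1
    · have hj1 : j = 1 := by omega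
      subst hj1
      have hm : (w : Int) ∣ m := by simpa using hdvd
      have hrec := ih (m + 1) w hw1 le_rfl
        (by
          have hd2 : (w : Int) ∣ ((m : Int) + w) := dvd_add hm ⟨1, by ring⟩
          have e : m + 1 + (w : Int) - 1 = m + w := by ring
          rw [e]; exact hd2)
      simp [aBody, bodyN, hmod.mpr hm, hrec]
    · have hnm : ¬ (w : Int) ∣ m := by
        intro hm
        have hd : (w : Int) ∣ ((m + j - 1) - m) := dvd_sub hdvd hm
        have hd' : (w : Int) ∣ ((j : Int) - 1) := by
          have : (m + (j : Int) - 1) - m = (j : Int) - 1 := by ring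
          rwa [this] at hd
        have hlt : (0 : Int) < (j : Int) - 1 := by omega
        have := Int.le_of_dvd hlt hd'
        omega
      have hrec := ih (m + 1) (j - 1) (by omega) (by omega)
        (by
          have : (m + 1) + ((j : Nat) - 1 : Nat) - 1 = m + (j : Int) - 1 := by
            push_cast [Nat.cast_sub h1]; ring
          rw [this]; exact hdvd)
      simp [aBody, bodyN, hj, hmod, hnm, hrec]

def flatJ (ys : List String) : List Char := (ys.map String.toList).flatten

-- the common target: the text, rows of w chars each terminated by '\n', last partial row bare
def Tc (w : Nat) (xs : List String) : List Char :=
  if h : xs = [] ∨ w = 0 then []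
  else
    flatJ (xs.take w) ++ (if w ≤ xs.length then '\n' :: Tc w (xs.drop w) else [])
termination_by xs.length
decreasing_by
  simp only [not_or] at h
  have : 0 < xs.length := List.length_pos_of_ne_nil h.1
  have : 0 < w := Nat.pos_of_ne_zero h.2
  simp [List.length_drop]; omega

theorem Tc_nil (w : Nat) : Tc w [] = [] := by rw [Tc]; simp

theorem Tc_ne (w : Nat) (xs : List String) (hw : 0 < w) (hxs : xs ≠ []) :
    Tc w xs = flatJ (xs.take w) ++ (if w ≤ xs.length then '\n' :: Tc w (xs.drop w) else []) := by
  rw [Tc, dif_neg (by simp [hxs]; omega)]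

theorem flatJ_cons (c : String) (l : List String) : flatJ (c :: l) = c.toList ++ flatJ l := by
  simp [flatJ]

theorem bodyN_flat (w : Nat) (hw : 0 < w) :
    ∀ (xs : List String) (j : Nat), 1 ≤ j → j ≤ w →
      flatJ (bodyN w xs j)
        = flatJ (xs.take j) ++ (if j ≤ xs.length then '\n' :: Tc w (xs.drop j) else []) := by
  intro xs
  induction xs with
  | nil => intro j h1 _; simp [bodyN, flatJ]; omega
  | cons c cs ih =>
    intro j h1 h2
    by_cases hj : j ≤ 1
    · have hj1 : j = 1 := by omega
      subst hj1
      have htc : flatJ (bodyN w cs w) = Tc w cs := by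
        rw [ih w hw le_rfl]
        by_cases hcs : cs = []
        · subst hcs; simp [Tc_nil, flatJ]; omega
        · rw [Tc_ne w cs hw hcs]
      simp only [bodyN, if_pos (le_refl 1), flatJ_cons, String.toList_append, htc]
      simp [flatJ]
    · have h2' : 2 ≤ j := by omega
      rw [bodyN, if_neg hj, flatJ_cons, ih (j-1) (by omega) (by omega)]
      have ht : (c :: cs).take j = c :: cs.take (j - 1) := by
        cases j with
        | zero => omega
        | succ n => simp [List.take_succ_cons]
      have hd : (c :: cs).drop j = cs.drop (j - 1) := by
        cases j with
        | zero => omega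
        | succ n => simp
      rw [ht, hd, flatJ_cons]
      simp only [List.length_cons]
      by_cases hlen : j - 1 ≤ cs.length
      · simp [hlen, show j ≤ cs.length + 1 from by omega, List.append_assoc]
      · simp [hlen, show ¬ j ≤ cs.length + 1 from by omega]

theorem bodyN_flat_top (w : Nat) (hw : 0 < w) (xs : List String) :
    flatJ (bodyN w xs w) = Tc w xs := by
  rw [bodyN_flat w hw xs w hw le_rfl]
  by_cases hcs : xs = []
  · subst hcs; simp [Tc_nil, flatJ]; omega
  · rw [Tc_ne w xs hw hcs]

-- B's chunk list, flattened, is the same text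
theorem chunkB (w : Nat) (hw : 0 < w) :
    ∀ (n : Nat) (xs : List String), xs.length ≤ n →
      ((List.range (xs.length / w)).map
          (fun k => flatJ ((xs.drop (k * w)).take w) ++ ['\n'])).flatten
        ++ (if xs.length % w ≠ 0 then flatJ (xs.drop ((xs.length / w) * w)) else [])
      = Tc w xs := by
  intro n
  induction n with
  | zero =>
    intro xs hn
    have hxs : xs = [] := List.eq_nil_of_length_eq_zero (by omega)
    subst hxs
    simp [Tc_nil, Nat.zero_div, flatJ]
  | succ n ih =>
    intro xs hn
    by_cases hxs : xs = []
    · subst hxs; simp [Tc_nil, Nat.zero_div, flatJ]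
    · have hL1 : 1 ≤ xs.length := List.length_pos_of_ne_nil hxs
      rw [Tc_ne w xs hw hxs]
      by_cases hcase : w ≤ xs.length
      · have hq : xs.length / w = (xs.length - w) / w + 1 := Nat.div_eq_sub_div hw hcase
        have hr : xs.length % w = (xs.length - w) % w := by
          conv_lhs => rw [← Nat.sub_add_cancel hcase]
          rw [Nat.add_mod_right]
        have hdd : ∀ k : Nat, xs.drop (k * w + w) = (xs.drop w).drop (k * w) := by
          intro k; rw [List.drop_drop, Nat.add_comm]
        rw [hq, List.range_succ_eq_map, List.map_cons, List.flatten_cons, List.map_map]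
        have hfix : ((fun k => flatJ ((xs.drop (k * w)).take w) ++ ['\n']) ∘ Nat.succ)
            = (fun k => flatJ (((xs.drop w).drop (k * w)).take w) ++ ['\n']) := by
          funext k
          simp only [Function.comp]
          rw [show Nat.succ k * w = k * w + w from by simp [Nat.succ_mul], hdd k]
        rw [hfix]
        have hL' : (xs.drop w).length = xs.length - w := by simp
        have hih := ih (xs.drop w) (by simp; omega)
        rw [hL'] at hih
        have htail : xs.drop (((xs.length - w) / w + 1) * w)
            = (xs.drop w).drop (((xs.length - w) / w) * w) := by
          rw [show ((xs.length - w) / w + 1) * w = ((xs.length - w) / w) * w + w from by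
              simp [Nat.add_mul], hdd _]
        rw [htail, hr, if_pos hcase]
        simp only [Nat.zero_mul, List.drop_zero]
        simp only [List.append_assoc]
        rw [hih]
        simp
      · have hlt : xs.length < w := by omega
        have hq : xs.length / w = 0 := Nat.div_eq_of_lt hlt
        have hr : xs.length % w = xs.length := Nat.mod_eq_of_lt hlt
        have htk : xs.take w = xs := List.take_of_length_le (by omega)
        rw [hq, hr, if_neg (by omega : ¬ w ≤ xs.length), htk]
        simp [flatJ, show xs.length ≠ 0 by omega]

theorem joinflat (l : List String) :
    (PySem.Str.join "" l).toList = flatJ l := by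
  rw [PySem.Str.toList_join, show ("" : String).toList = [] from rfl, join_empty_sep, flatJ]

theorem flatJ_append (a b : List String) : flatJ (a ++ b) = flatJ a ++ flatJ b := by
  simp [flatJ]

theorem flatJ_map_toList {α : Type} (l : List α) (g : α → String) :
    flatJ (l.map g) = (l.map (fun x => (g x).toList)).flatten := by
  simp [flatJ, List.map_map]
  rfl

theorem hdm_lemma (L w : Nat) (hw : 0 < w) :
    PySem.Int.divmod? ((L : Nat) : Int) ((w : Nat) : Int)
      = some (((L / w : Nat) : Int), ((L % w : Nat) : Int)) := by
  simp [PySem.Int.divmod?]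
  refine ⟨by omega, ?_, ?_⟩
  · have := PySem.Int.floordiv_natCast L w
    simpa [PySem.Int.floordiv] using this
  · have := PySem.Int.mod_natCast L w
    simpa [PySem.Int.mod] using this

theorem main_eq (xs : List String) (width : Int)
    (hpre : 0 < width ∨ (xs = [] ∧ width ≠ 0)) :
    format_ascii_img xs width = format_ascii_img_alt xs width := by
  have hwid : width ≠ 0 := by rcases hpre with h | ⟨_, h⟩ <;> omega
  rcases hpre with hpos | ⟨hnil, _⟩
  · -- positive width: both sides produce the text Tc w xs
    set w : Nat := width.natAbs with hwdef
    have hw0 : 0 < w := Int.natAbs_pos.mpr hwid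
    have hwcast : width = (w : Int) := by
      rw [hwdef, Int.natAbs_of_nonneg (le_of_lt hpos)]
    apply String.toList_inj.mp
    -- A side
    have hA : format_ascii_img xs width = PySem.Str.join "" (aBody width xs 1) := by
      unfold format_ascii_img
      rw [foldA width xs [] 1]
      simp
    have habody : aBody width xs 1 = bodyN w xs w :=
      aBody_eq_bodyN width hwid w hwdef xs 1 w hw0 le_rfl ⟨1, by ring⟩
    have hAside : (format_ascii_img xs width).toList = Tc w xs := by
      rw [hA, habody, joinflat, bodyN_flat_top w hw0]
    -- B side
    have hmapel : ∀ k : Nat,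
        ((fun i => PySem.Str.join ""
              (PySem.List.slice xs (some (i * (w : Int))) (some ((i + 1) * (w : Int)))) ++ "\n")
            ((k : Nat) : Int)).toList
        = flatJ ((xs.drop (k * w)).take w) ++ ['\n'] := by
      intro k
      have hb1 : ((k : Int) * (w : Int)) = ((k * w : Nat) : Int) := by push_cast; ring
      have hb2 : (((k : Int) + 1) * (w : Int)) = ((k * w : Nat) : Int) + ((w : Nat) : Int) := by
        push_cast; ring
      simp only []
      rw [hb1, hb2, PySem.List.slice_natCast_add, String.toList_append, joinflat]
      rfl
    have hBside : (format_ascii_img_alt xs width).toList = Tc w xs := by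
      unfold format_ascii_img_alt
      rw [hwcast, hdm_lemma xs.length w hw0]
      dsimp only
      rw [PySem.List.pyRange_zero_natCast (xs.length / w), List.map_map]
      by_cases hrem : xs.length % w = 0
      · rw [if_neg (by simp [hrem])]
        rw [joinflat, flatJ_map_toList]
        simp only [Function.comp]
        rw [List.map_congr_left (fun k _ => hmapel k)]
        have := chunkB w hw0 xs.length xs le_rfl
        rw [if_neg (by simp [hrem])] at this
        simpa using this
      · rw [if_pos (by exact_mod_cast hrem)]
        rw [joinflat, flatJ_append, flatJ_map_toList]
        simp only [Function.comp]
        rw [List.map_congr_left (fun k _ => hmapel k)]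
        have htail : flatJ [PySem.Str.join ""
            (PySem.List.slice xs (some (((xs.length / w : Nat) : Int) * (w : Int))) none)]
            = flatJ (xs.drop ((xs.length / w) * w)) := by
          rw [show (((xs.length / w : Nat) : Int) * (w : Int)) = (((xs.length / w) * w : Nat) : Int)
              from by push_cast; ring,
            PySem.List.slice_from_natCast]
          simp [flatJ]
          exact join_empty_sep _
        rw [htail]
        have := chunkB w hw0 xs.length xs le_rfl
        rw [if_pos hrem] at this
        exact this
    rw [hAside, hBside]
  · -- empty input, nonzero width: both sides are ""
    subst hnil
    have hA : format_ascii_img [] width = "" := by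
      unfold format_ascii_img; rfl
    have hB : format_ascii_img_alt [] width = "" := by
      unfold format_ascii_img_alt
      have h0 : PySem.Int.divmod? ((List.length ([] : List String) : Nat) : Int) width
          = some (0, 0) := by
        simp [PySem.Int.divmod?, hwid]
      rw [h0]
      dsimp only
      rw [show PySem.List.pyRange 0 0 1 = [] from by
        simpa using PySem.List.pyRange_zero_natCast 0]
      simp
      rfl
    rw [hA, hB]

-- ===== VERDICT (by name: the statement is the Claim_ definition above) =====
theorem format_ascii_img_spec : Claim_equal_format_ascii_img := by
  intro char_array width _ hpre
  unfold Spec_format_ascii_img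
  exact main_eq char_array width hpre
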